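-- pv_equiv track=rewrite | github.com/tamuda/Sliding-block-puzzle | puzzle.py | generate_goal_state
-- ===== SOURCE A (Python) =====
-- from typing import List, Tuple, Optional
--
-- def generate_goal_state(size: int) -> List[List[int]]:
--     """
--     Generates the goal state for a puzzle of the given size.
--
--     :param size: Size of the puzzle.
--     :return: 2D list representing the goal puzzle board.
--     """
--     goal = [list(range(i * size, (i + 1) * size)) for i in range(size)]
--     # Place the blank tile (0) at the top-left corner
--     goal[0][0] = 0
--     count = 1
--     for i in range(size):
--         for j in range(size):
--             if i == 0 and j == 0:
--                 continue
--             goal[i][j] = count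
--             count += 1
--     return goal
-- ===== SOURCE B (Python) =====
-- from typing import List
--
-- def generate_goal_state(size: int) -> List[List[int]]:
--     """Goal state as one flat sequence 0..size*size-1, reshaped into rows."""
--     flat = list(range(size * size))
--     return [flat[i * size:(i + 1) * size] for i in range(size)]
-- ===== Notes on version B (the rewrite author's own statement) =====
-- stated objective: simpler
-- what changed: B builds the flat sequence 0..size*size-1 once and reshapes it into rows by slicing, instead of A's per-row range construction followed by a redundant second nested loop that reassigns every cell (and the blank-tile write).
-- outside the precondition, e.g. on generate_goal_state(0): A raises IndexError, B returns []
import Mathlib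
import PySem

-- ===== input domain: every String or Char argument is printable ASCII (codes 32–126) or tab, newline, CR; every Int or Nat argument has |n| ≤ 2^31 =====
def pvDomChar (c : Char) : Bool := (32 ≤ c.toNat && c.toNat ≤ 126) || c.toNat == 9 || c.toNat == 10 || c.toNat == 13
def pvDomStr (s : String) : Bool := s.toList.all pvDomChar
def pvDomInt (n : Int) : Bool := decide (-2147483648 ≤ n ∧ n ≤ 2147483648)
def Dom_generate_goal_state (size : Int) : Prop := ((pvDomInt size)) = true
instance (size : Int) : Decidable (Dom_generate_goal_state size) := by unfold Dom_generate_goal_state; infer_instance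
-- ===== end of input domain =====

-- B builds the flat sequence 0..size*size-1 once and reshapes it by slicing, replacing A's
-- per-row construction plus redundant second nested reassignment loop (objective: simpler).


-- ===== PORT A =====
-- board[i][j] = v (valid only when the indices are in range; Pre_ guarantees that wherever used)
def pySetCell (b : List (List Int)) (i j : Nat) (v : Int) : List (List Int) :=
  b.set i ((b.getD i []).set j v)

def generate_goal_state (size : Int) : List (List Int) :=
  -- goal = [list(range(i*size, (i+1)*size)) for i in range(size)]
  let goal := (PySem.List.pyRange 0 size 1).map
    (fun i => PySem.List.pyRange (i * size) ((i + 1) * size) 1)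
  -- goal[0][0] = 0  (Python raises IndexError when size <= 0; excluded by Pre_)
  let goal := pySetCell goal 0 0 0
  -- count = 1; nested for-loops reassigning every non-(0,0) cell
  let res := (PySem.List.pyRange 0 size 1).foldl
    (fun st i =>
      (PySem.List.pyRange 0 size 1).foldl
        (fun (st : List (List Int) × Int) j =>
          if i = 0 ∧ j = 0 then st
          else (pySetCell st.1 i.toNat j.toNat st.2, st.2 + 1))
        st)
    (goal, (1 : Int))
  res.1

-- ===== PORT B =====
def generate_goal_state_alt (size : Int) : List (List Int) :=
  -- flat = list(range(size*size)); [flat[i*size:(i+1)*size] for i in range(size)]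
  let flat := PySem.List.pyRange 0 (size * size) 1
  (PySem.List.pyRange 0 size 1).map
    (fun i => PySem.List.slice flat (some (i * size)) (some ((i + 1) * size)))

-- ===== PRECONDITION & SPEC =====
-- Pre_ excludes size <= 0, where Python A raises IndexError on goal[0][0].
def Pre_generate_goal_state (size : Int) : Prop := 1 ≤ size
instance (size : Int) : Decidable (Pre_generate_goal_state size) := by
  unfold Pre_generate_goal_state; infer_instance

def pvWitness_generate_goal_state : Int := (3)

def Spec_generate_goal_state (size : Int) (out : List (List Int)) : Prop :=
  out = generate_goal_state_alt size
instance (size : Int) (out : List (List Int)) : Decidable (Spec_generate_goal_state size out) := by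
  unfold Spec_generate_goal_state; infer_instance

-- ===== CLAIM (what is proved, stated in full; the proofs are below) =====
def Claim_equal_generate_goal_state : Prop :=
  ∀ (size : Int), Dom_generate_goal_state size → Pre_generate_goal_state size →
    Spec_generate_goal_state size (generate_goal_state size)

-- ===== LEMMAS AND PROOFS =====

-- the row-major board both programs denote
def pvBoard (n : Int) : List (List Int) :=
  (PySem.List.pyRange 0 n 1).map (fun i => PySem.List.pyRange (i * n) ((i + 1) * n) 1)

lemma pvBoard_length (n : Int) : (pvBoard n).length = n.toNat := by
  simp [pvBoard, PySem.List.length_pyRange_one]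

lemma pvBoard_getElem (n : Int) (i : Nat) (h : i < (pvBoard n).length) :
    (pvBoard n)[i] = PySem.List.pyRange ((i : Int) * n) (((i : Int) + 1) * n) 1 := by
  simp [pvBoard, PySem.List.getElem_pyRange_one]

lemma setCell_self (n : Int) (i j : Nat) (hi : (i : Int) < n) (hj : (j : Int) < n) :
    pySetCell (pvBoard n) i j ((i : Int) * n + (j : Int)) = pvBoard n := by
  have hilen : i < (pvBoard n).length := by
    rw [pvBoard_length]; omega
  have hgetD : (pvBoard n).getD i [] = (pvBoard n)[i] := List.getD_eq_getElem _ _ hilen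
  have hrow : (pvBoard n)[i] = PySem.List.pyRange ((i : Int) * n) (((i : Int) + 1) * n) 1 :=
    pvBoard_getElem n i hilen
  have hrowlen : j < (PySem.List.pyRange ((i : Int) * n) (((i : Int) + 1) * n) 1).length := by
    rw [PySem.List.length_pyRange_one]
    have : ((i : Int) + 1) * n - (i : Int) * n = n := by ring
    omega
  have hrowset : (PySem.List.pyRange ((i : Int) * n) (((i : Int) + 1) * n) 1).set j
      ((i : Int) * n + (j : Int)) = PySem.List.pyRange ((i : Int) * n) (((i : Int) + 1) * n) 1 := by
    conv_lhs => rw [← PySem.List.getElem_pyRange_one ((i : Int) * n) (((i : Int) + 1) * n) j hrowlen]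
    exact List.set_getElem_self hrowlen
  unfold pySetCell
  rw [hgetD, hrow, hrowset, ← hrow, List.set_getElem_self hilen]

-- the inner loop body of port A, for row index i
def pvStep (i : Int) (st : List (List Int) × Int) (j : Int) : List (List Int) × Int :=
  if i = 0 ∧ j = 0 then st
  else (pySetCell st.1 i.toNat j.toNat st.2, st.2 + 1)

lemma inner_pos (n i : Int) (hi : 1 ≤ i) (hin : i < n) :
    ∀ m : Nat, (m : Int) ≤ n →
      (PySem.List.pyRange 0 (m : Int) 1).foldl (pvStep i) (pvBoard n, i * n) =
        (pvBoard n, i * n + (m : Int)) := by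
  intro m
  induction m with
  | zero => intro _; simp [PySem.List.pyRange_one_eq_nil]
  | succ m ih =>
    intro hm
    have hm' : (m : Int) ≤ n := by push_cast at hm; omega
    have hsp : PySem.List.pyRange 0 ((m : Nat) + 1 : Int) 1 =
        PySem.List.pyRange 0 (m : Int) 1 ++ [(m : Int)] :=
      PySem.List.pyRange_one_succ_right (by positivity)
    have hcast : ((m + 1 : Nat) : Int) = ((m : Nat) + 1 : Int) := by push_cast; ring
    rw [hcast, hsp, List.foldl_append, ih hm']
    have hi0 : ¬ (i = 0 ∧ (m : Int) = 0) := by omega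
    have hmn : (m : Int) < n := by push_cast at hm; omega
    have htn : (i.toNat : Int) = i := Int.toNat_of_nonneg (by omega)
    have hcell : pySetCell (pvBoard n) i.toNat ((m : Int)).toNat (i * n + (m : Int)) = pvBoard n := by
      have := setCell_self n i.toNat m (by rw [htn]; omega) (by omega)
      simpa [htn] using this
    simp only [List.foldl_cons, List.foldl_nil, pvStep]
    rw [if_neg (by omega), hcell]
    ring_nf

lemma inner_zero (n : Int) :
    ∀ m : Nat, 1 ≤ m → (m : Int) ≤ n →
      (PySem.List.pyRange 0 (m : Int) 1).foldl (pvStep 0) (pvBoard n, 1) =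
        (pvBoard n, (m : Int)) := by
  intro m
  induction m with
  | zero => omega
  | succ m ih =>
    intro _ hm
    by_cases hm1 : m = 0
    · subst hm1
      have : PySem.List.pyRange 0 ((0 : Nat) + 1 : Int) 1 = [(0 : Int)] := by
        simpa using PySem.List.pyRange_one_singleton (a := 0)
      simp only [Nat.cast_zero, Nat.cast_one, zero_add] at this ⊢
      rw [this]
      simp [pvStep]
    · have hm' : 1 ≤ m := by omega
      have hmn : (m : Int) ≤ n := by push_cast at hm; omega
      have hsp : PySem.List.pyRange 0 ((m : Nat) + 1 : Int) 1 =
          PySem.List.pyRange 0 (m : Int) 1 ++ [(m : Int)] :=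
        PySem.List.pyRange_one_succ_right (by positivity)
      have hcast : ((m + 1 : Nat) : Int) = ((m : Nat) + 1 : Int) := by push_cast; ring
      rw [hcast, hsp, List.foldl_append, ih hm' hmn]
      have hmn' : (m : Int) < n := by push_cast at hm; omega
      have hcell : pySetCell (pvBoard n) (0 : Int).toNat ((m : Int)).toNat (m : Int) = pvBoard n := by
        have := setCell_self n 0 m (by push_cast; omega) (by omega)
        simpa using this
      simp only [List.foldl_cons, List.foldl_nil, pvStep]
      rw [if_neg (by simp [hm1]), hcell]

lemma outer_loop (n : Int) (hn : 1 ≤ n) :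
    ∀ m : Nat, 1 ≤ m → (m : Int) ≤ n →
      (PySem.List.pyRange 0 (m : Int) 1).foldl
        (fun st i => (PySem.List.pyRange 0 n 1).foldl (pvStep i) st) (pvBoard n, 1) =
        (pvBoard n, (m : Int) * n) := by
  intro m
  have hnsp : PySem.List.pyRange 0 n 1 = PySem.List.pyRange 0 ((n.toNat : Nat) : Int) 1 := by
    rw [Int.toNat_of_nonneg (by omega)]
  induction m with
  | zero => omega
  | succ m ih =>
    intro _ hm
    by_cases hm1 : m = 0
    · subst hm1
      have hone : PySem.List.pyRange 0 ((0 : Nat) + 1 : Int) 1 = [(0 : Int)] := by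
        simpa using PySem.List.pyRange_one_singleton (a := 0)
      simp only [Nat.cast_zero, Nat.cast_one, zero_add] at hone ⊢
      rw [hone]
      simp only [List.foldl_cons, List.foldl_nil]
      rw [hnsp, inner_zero n n.toNat (by omega) (by rw [Int.toNat_of_nonneg (by omega)])]
      rw [Int.toNat_of_nonneg (by omega)]; ring_nf
    · have hm' : 1 ≤ m := by omega
      have hmn : (m : Int) ≤ n := by push_cast at hm; omega
      have hsp : PySem.List.pyRange 0 ((m : Nat) + 1 : Int) 1 =
          PySem.List.pyRange 0 (m : Int) 1 ++ [(m : Int)] :=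
        PySem.List.pyRange_one_succ_right (by positivity)
      have hcast : ((m + 1 : Nat) : Int) = ((m : Nat) + 1 : Int) := by push_cast; ring
      rw [hcast, hsp, List.foldl_append, ih hm' hmn]
      simp only [List.foldl_cons, List.foldl_nil]
      have hmn' : (m : Int) < n := by push_cast at hm; omega
      rw [hnsp, inner_pos n (m : Int) (by omega) hmn' n.toNat
            (by rw [Int.toNat_of_nonneg (by omega)])]
      rw [Int.toNat_of_nonneg (by omega)]; ring_nf

lemma portA_eq_board (n : Int) (hn : 1 ≤ n) : generate_goal_state n = pvBoard n := by
  unfold generate_goal_state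
  have hinit : pySetCell (pvBoard n) 0 0 0 = pvBoard n := by
    simpa using setCell_self n 0 0 (by omega) (by omega)
  show ((PySem.List.pyRange 0 n 1).foldl
      (fun st i => (PySem.List.pyRange 0 n 1).foldl
        (fun (st : List (List Int) × Int) j =>
          if i = 0 ∧ j = 0 then st
          else (pySetCell st.1 i.toNat j.toNat st.2, st.2 + 1)) st)
      (pySetCell (pvBoard n) 0 0 0, (1 : Int))).1 = pvBoard n
  rw [hinit]
  have hrw : n = ((n.toNat : Nat) : Int) := (Int.toNat_of_nonneg (by omega)).symm
  have := outer_loop n hn n.toNat (by omega) (by omega)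
  rw [← hrw] at this
  have hstep : (fun (st : List (List Int) × Int) i =>
      (PySem.List.pyRange 0 n 1).foldl (pvStep i) st) =
      (fun st i => (PySem.List.pyRange 0 n 1).foldl
        (fun (st : List (List Int) × Int) j =>
          if i = 0 ∧ j = 0 then st
          else (pySetCell st.1 i.toNat j.toNat st.2, st.2 + 1)) st) := by
    funext st i; rfl
  rw [← hstep, this]

lemma slice_flat (n i : Int) (h0 : 0 ≤ i) (hin : i < n) :
    PySem.List.slice (PySem.List.pyRange 0 (n * n) 1) (some (i * n)) (some ((i + 1) * n)) =
      PySem.List.pyRange (i * n) ((i + 1) * n) 1 := by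
  have hn0 : 0 < n := by omega
  have ha0 : 0 ≤ i * n := by positivity
  have hb0 : 0 ≤ (i + 1) * n := by positivity
  have hab : i * n ≤ (i + 1) * n := by nlinarith
  have hbn : (i + 1) * n ≤ n * n := by nlinarith
  rw [PySem.List.slice_toNat _ ha0 hb0]
  rw [PySem.List.pyRange_one_append 0 (i * n) (n * n) ha0 (by omega)]
  have hlen1 : (PySem.List.pyRange 0 (i * n) 1).length = (i * n).toNat := by
    rw [PySem.List.length_pyRange_one]; omega
  rw [← hlen1, List.drop_left]
  rw [PySem.List.pyRange_one_append (i * n) ((i + 1) * n) (n * n) hab hbn]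
  have hlen2 : (PySem.List.pyRange (i * n) ((i + 1) * n) 1).length =
      ((i + 1) * n).toNat - (i * n).toNat := by
    rw [PySem.List.length_pyRange_one]; omega
  rw [hlen1, ← hlen2, List.take_left]

lemma portB_eq_board (n : Int) : generate_goal_state_alt n = pvBoard n := by
  unfold generate_goal_state_alt pvBoard
  apply List.map_congr_left
  intro i hi
  rw [PySem.List.mem_pyRange_one] at hi
  exact slice_flat n i hi.1 hi.2

-- ===== VERDICT (by name: the statement is the Claim_ definition above) =====
theorem generate_goal_state_spec : Claim_equal_generate_goal_state := by
  intro size _ hpre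
  unfold Spec_generate_goal_state
  rw [portA_eq_board size hpre, portB_eq_board size]
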